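-- pv_equiv track=rewrite | github.com/LakshayBaijal/Computer-Vision_Assignments_Lakshay | Assignment4/Q2/code/comparison_eval.py | choose_target_class_indices
-- ===== SOURCE A (Python) =====
-- from typing import Dict, List, Tuple
--
-- def build_label_to_idx(class_index: Dict[int, Dict[str, str]]) -> Dict[str, int]:
--     return {v["label"].lower(): k for k, v in class_index.items()}
--
-- def choose_target_class_indices(
--     class_index: Dict[int, Dict[str, str]],
--     class_hints: List[str],
-- ) -> List[int]:
--     label_to_idx = build_label_to_idx(class_index)
--     selected = []
--     for hint in class_hints:
--         key = hint.strip().lower()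
--         if key in label_to_idx:
--             selected.append(label_to_idx[key])
--             continue
--         # fallback substring match
--         candidates = [idx for idx, v in class_index.items() if key in v["label"].lower()]
--         if not candidates:
--             raise ValueError(f"Could not match class hint: {hint}")
--         selected.append(candidates[0])
--     return selected
-- ===== SOURCE B (Python) =====
-- from typing import Dict, List
--
--
-- def choose_target_class_indices(
--     class_index: Dict[int, Dict[str, str]],
--     class_hints: List[str],
-- ) -> List[int]:
--     # Loop interchange: one outer pass over class_index updates per-hint tables
--     # (last exact match, first substring match); a final pass assembles the answer.
--     keys = [h.strip().lower() for h in class_hints]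
--     exact: List = [None] * len(keys)
--     sub: List = [None] * len(keys)
--     for idx, v in class_index.items():
--         lbl = v["label"].lower()
--         for j, key in enumerate(keys):
--             if lbl == key:
--                 exact[j] = idx
--             if sub[j] is None and key in lbl:
--                 sub[j] = idx
--     selected = []
--     for hint, e, s in zip(class_hints, exact, sub):
--         if e is not None:
--             selected.append(e)
--         elif s is not None:
--             selected.append(s)
--         else:
--             raise ValueError(f"Could not match class hint: {hint}")
--     return selected
-- ===== Notes on version B (the rewrite author's own statement) =====
-- stated objective: alternative
-- what changed: Loop interchange: instead of A's precomputed label-to-index dict plus a per-hint fallback list-comprehension scan, B makes a single outer pass over class_index that updates per-hint accumulator tables (last exact match, first substring match) for all hints at once, then assembles the result in a final pass.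
import Mathlib
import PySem

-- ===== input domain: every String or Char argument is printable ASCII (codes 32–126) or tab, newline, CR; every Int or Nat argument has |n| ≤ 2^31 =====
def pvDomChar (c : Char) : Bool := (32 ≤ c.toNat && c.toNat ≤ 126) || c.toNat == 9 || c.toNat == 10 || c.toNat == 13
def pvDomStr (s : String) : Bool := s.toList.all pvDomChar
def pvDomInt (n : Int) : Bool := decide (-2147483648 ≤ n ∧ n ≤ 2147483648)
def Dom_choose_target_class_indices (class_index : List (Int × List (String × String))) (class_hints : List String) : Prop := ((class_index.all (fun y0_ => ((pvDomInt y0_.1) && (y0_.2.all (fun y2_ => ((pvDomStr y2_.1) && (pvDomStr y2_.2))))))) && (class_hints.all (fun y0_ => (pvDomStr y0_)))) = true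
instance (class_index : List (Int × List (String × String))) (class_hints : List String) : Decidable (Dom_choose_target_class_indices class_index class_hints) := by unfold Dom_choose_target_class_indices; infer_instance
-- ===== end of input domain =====

-- B interchanges the loops: one outer pass over class_index updates per-hint tables (last exact
-- match, first substring match) for all hints at once, then a final pass assembles the result
-- (alternative decomposition, not faster).


-- ===== PORT A =====
-- v["label"].lower() (inner dicts collapsed Python-style; Pre_ guarantees "label" is present, the getD "" is never used there)
def pvLbl (kv : Int × List (String × String)) : String :=
  PySem.Str.lower (((PySem.Dict.ofList kv.2).get? "label").getD "")

-- build_label_to_idx: {v["label"].lower(): k for k, v in class_index.items()}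
def build_label_to_idx (items : List (Int × List (String × String))) : PySem.Dict String Int :=
  items.foldl (fun d kv => d.insert (pvLbl kv) kv.1) PySem.Dict.empty

def choose_target_class_indices (class_index : List (Int × List (String × String))) (class_hints : List String) : List Int :=
  class_hints.foldl (fun selected hint =>
    -- key = hint.strip().lower()
    match (build_label_to_idx (PySem.Dict.ofList class_index).items).get?
        (PySem.Str.lower (PySem.Str.strip hint)) with
    | some i => selected ++ [i]
    | none =>
      match ((PySem.Dict.ofList class_index).items.filter
          (fun kv => PySem.Str.isIn (PySem.Str.lower (PySem.Str.strip hint)) (pvLbl kv))).map (fun kv => kv.1) with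
      | [] => selected          -- Python raises ValueError here; excluded by Pre_
      | c :: _ => selected ++ [c]) []

-- ===== PORT B =====
-- inner loop body: update one hint's (exact, sub) cell for item (idx, label lbl)
def pvCell (lbl : String) (idx : Int) (key : String) (p : Option Int × Option Int) : Option Int × Option Int :=
  ((if lbl == key then some idx else p.1),
   (if p.2 == none && PySem.Str.isIn key lbl then some idx else p.2))

-- outer pass over the items: a table with one (last exact, first substring) cell per hint key
def pvTable (items : List (Int × List (String × String))) (keys : List String) :
    List (Option Int × Option Int) :=
  items.foldl (fun st kv => (keys.zip st).map (fun kp => pvCell (pvLbl kv) kv.1 kp.1 kp.2))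
    (keys.map (fun _ => (none, none)))

def choose_target_class_indices_alt (class_index : List (Int × List (String × String))) (class_hints : List String) : List Int :=
  let keys := class_hints.map (fun h => PySem.Str.lower (PySem.Str.strip h))
  let tbl := pvTable (PySem.Dict.ofList class_index).items keys
  (class_hints.zip tbl).foldl (fun selected hp =>
    match hp.2 with
    | (some i, _) => selected ++ [i]
    | (none, some i) => selected ++ [i]
    | (none, none) => selected) []     -- Python raises ValueError here; excluded by Pre_

-- ===== PRECONDITION & SPEC =====
-- Pre_ excludes exactly the inputs where A raises: a KeyError when some (surviving) inner dict
-- lacks the key "label", and a ValueError when some hint matches no label even as a substring.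
def Pre_choose_target_class_indices (class_index : List (Int × List (String × String))) (class_hints : List String) : Prop :=
  (∀ kv ∈ (PySem.Dict.ofList class_index).items, ((PySem.Dict.ofList kv.2).get? "label").isSome) ∧
  (∀ h ∈ class_hints, ∃ kv ∈ (PySem.Dict.ofList class_index).items,
      PySem.Str.isIn (PySem.Str.lower (PySem.Str.strip h)) (pvLbl kv) = true)
instance (class_index : List (Int × List (String × String))) (class_hints : List String) : Decidable (Pre_choose_target_class_indices class_index class_hints) := by unfold Pre_choose_target_class_indices; infer_instance

def pvWitness_choose_target_class_indices : (List (Int × List (String × String))) × List String :=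
  ([(0, [("label", "Cat")]), (1, [("label", "dog")])], [" cat ", "og"])

def Spec_choose_target_class_indices (class_index : List (Int × List (String × String))) (class_hints : List String) (out : List Int) : Prop := out = choose_target_class_indices_alt class_index class_hints
instance (class_index : List (Int × List (String × String))) (class_hints : List String) (out : List Int) : Decidable (Spec_choose_target_class_indices class_index class_hints out) := by unfold Spec_choose_target_class_indices; infer_instance

-- ===== CLAIM (what is proved, stated in full; the proofs are below) =====
def Claim_equal_choose_target_class_indices : Prop := ∀ (class_index : List (Int × List (String × String))) (class_hints : List String), Dom_choose_target_class_indices class_index class_hints → Pre_choose_target_class_indices class_index class_hints → Spec_choose_target_class_indices class_index class_hints (choose_target_class_indices class_index class_hints)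

-- ===== LEMMAS AND PROOFS =====

-- the pointwise outer pass is, per key, an independent per-key fold
theorem pv_table_eq_map (items : List (Int × List (String × String))) (keys : List String)
    (g : String → Option Int × Option Int) :
    items.foldl (fun st kv => (keys.zip st).map (fun kp => pvCell (pvLbl kv) kv.1 kp.1 kp.2))
        (keys.map g)
      = keys.map (fun key => items.foldl (fun p kv => pvCell (pvLbl kv) kv.1 key p) (g key)) := by
  induction items generalizing g with
  | nil => rfl
  | cons kv t ih =>
    simp only [List.foldl_cons]
    have hz : (keys.zip (keys.map g)).map (fun kp => pvCell (pvLbl kv) kv.1 kp.1 kp.2)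
        = keys.map (fun key => pvCell (pvLbl kv) kv.1 key (g key)) := by
      have : keys.zip (keys.map g) = keys.map (fun k => (k, g k)) := by
        simpa using (List.zip_map' (f := id) (g := g) (l := keys))
      simp [this, List.map_map, Function.comp]
    rw [hz, ih (fun key => pvCell (pvLbl kv) kv.1 key (g key))]

-- the dict comprehension's lookup is the last-wins running exact match
theorem pv_get?_build (items : List (Int × List (String × String))) (key : String) (d : PySem.Dict String Int) :
    (items.foldl (fun d kv => d.insert (pvLbl kv) kv.1) d).get? key
      = items.foldl (fun e kv => if pvLbl kv == key then some kv.1 else e) (d.get? key) := by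
  induction items generalizing d with
  | nil => rfl
  | cons kv t ih =>
    simp only [List.foldl_cons, ih, PySem.Dict.get?_insert]
    congr 1
    by_cases h : pvLbl kv = key
    · simp [h]
    · simp [Ne.symm h, (by simpa using h : (pvLbl kv == key) = false)]

-- a set 'first substring match' is never overwritten
theorem pv_sub_some (items : List (Int × List (String × String))) (key : String) (i : Int) :
    items.foldl (fun s kv => if s == none && PySem.Str.isIn key (pvLbl kv) then some kv.1 else s) (some i) = some i := by
  induction items with
  | nil => rfl
  | cons kv t ih => simpa using ih

-- the running first substring match is the head of A's candidate list
theorem pv_sub_none (items : List (Int × List (String × String))) (key : String) :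
    items.foldl (fun s kv => if s == none && PySem.Str.isIn key (pvLbl kv) then some kv.1 else s) none
      = ((items.filter (fun kv => PySem.Str.isIn key (pvLbl kv))).map (fun kv => kv.1)).head? := by
  induction items with
  | nil => rfl
  | cons kv t ih =>
    cases h : PySem.Str.isIn key (pvLbl kv) with
    | true =>
      simp only [List.foldl_cons, List.filter_cons, h, Bool.and_true, beq_self_eq_true,
        if_pos, List.map_cons, List.head?_cons]
      exact pv_sub_some t key kv.1
    | false =>
      simp only [List.foldl_cons, List.filter_cons, h, Bool.and_false, Bool.false_eq_true,
        if_false]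
      exact ih

-- one cell of B's table, as the two independent folds over the items
theorem pv_cell_fold (items : List (Int × List (String × String))) (key : String) :
    items.foldl (fun p kv => pvCell (pvLbl kv) kv.1 key p) (none, none) =
      (items.foldl (fun e kv => if pvLbl kv == key then some kv.1 else e) none,
       items.foldl (fun s kv => if s == none && PySem.Str.isIn key (pvLbl kv) then some kv.1 else s) none) := by
  unfold pvCell
  rw [PySem.List.foldl_prod_mk
    (f := fun e kv => if pvLbl kv == key then some kv.1 else e)
    (g := fun s kv => if s == none && PySem.Str.isIn key (pvLbl kv) then some kv.1 else s)]

-- ===== VERDICT (by name: the statement is the Claim_ definition above) =====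
theorem choose_target_class_indices_spec : Claim_equal_choose_target_class_indices := by
  intro class_index class_hints _ _
  unfold Spec_choose_target_class_indices
  unfold choose_target_class_indices choose_target_class_indices_alt build_label_to_idx pvTable
  simp only []
  rw [pv_table_eq_map]
  have hz : class_hints.zip
      ((class_hints.map (fun h => PySem.Str.lower (PySem.Str.strip h))).map
        (fun key => (PySem.Dict.ofList class_index).items.foldl (fun p kv => pvCell (pvLbl kv) kv.1 key p) (none, none)))
      = class_hints.map (fun h => (h, (PySem.Dict.ofList class_index).items.foldl
          (fun p kv => pvCell (pvLbl kv) kv.1 (PySem.Str.lower (PySem.Str.strip h)) p) (none, none))) := by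
    rw [List.map_map]
    simpa using (List.zip_map' (f := id)
      (g := fun h => (PySem.Dict.ofList class_index).items.foldl
        (fun p kv => pvCell (pvLbl kv) kv.1 (PySem.Str.lower (PySem.Str.strip h)) p) (none, none))
      (l := class_hints))
  rw [hz, List.foldl_map]
  apply PySem.List.foldl_congr_mem
  intro sel hint _
  rw [pv_cell_fold, pv_get?_build, PySem.Dict.get?_empty, pv_sub_none]
  cases hE : (PySem.Dict.ofList class_index).items.foldl
      (fun e kv => if pvLbl kv == PySem.Str.lower (PySem.Str.strip hint) then some kv.1 else e) none with
  | some i => rfl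
  | none =>
    cases hC : ((PySem.Dict.ofList class_index).items.filter
        (fun kv => PySem.Str.isIn (PySem.Str.lower (PySem.Str.strip hint)) (pvLbl kv))).map (fun kv => kv.1) with
    | nil => rfl
    | cons c t => rfl
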